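-- pv_equiv track=rewrite | github.com/HodgesGenomicsLab/ATAC-STARR_cis_trans | 5_evolutionary_characterization_of_cis_and_trans_effects/acceleration/0-launch_conacc-mapping.py | make_run_list
-- ===== SOURCE A (Python) =====
-- def make_run_list(branches, models, chrs):
--
--     """
--     return list of branch, model, and chr pairs to write in mapping file, run
--
--     exclude specific branch, model tuples that don't make sense to test.
--
--     inputs
--         branches (list)
--         models (list)
--         chr_list (list)
--
--     output
--         runs (list of lists)
--     """
--     runs = []
--     no_runs = [('hg38', 'rheMac8_noOWM') ,
--                ('hg38-rheMac8', 'rheMac8_noOWM'),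
--                ('hg38-rheMac8', 'hg38_noAPES'),
--               ('rheMac8', 'hg38_noAPES')
--               ] # don't run these tuples. Not interested yet in these results
--     for b in branches:
--         for m in models:
--             for c in chrs:
--                 combo = [b, m, c]
--                 if combo not in runs and (b,m) not in no_runs:
--                     runs.append(combo)
--
--     return runs
-- ===== SOURCE B (Python) =====
-- def make_run_list(branches, models, chrs):
--     no_runs = [('hg38', 'rheMac8_noOWM'),
--                ('hg38-rheMac8', 'rheMac8_noOWM'),
--                ('hg38-rheMac8', 'hg38_noAPES'),
--                ('rheMac8', 'hg38_noAPES')]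
--     pairs = []
--     for b in branches:
--         for m in models:
--             if (b, m) not in no_runs and (b, m) not in pairs:
--                 pairs.append((b, m))
--     uniq_chrs = []
--     for c in chrs:
--         if c not in uniq_chrs:
--             uniq_chrs.append(c)
--     runs = []
--     for b, m in pairs:
--         for c in uniq_chrs:
--             runs.append([b, m, c])
--     return runs
-- ===== Notes on version B (the rewrite author's own statement) =====
-- stated objective: faster
-- what changed: Replaces the triple loop that rescans the whole runs list for every (b,m,c) combo with two small dedup passes (valid pairs, unique chromosomes) followed by a plain cross-product expansion that appends without any membership test.
import Mathlib
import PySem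

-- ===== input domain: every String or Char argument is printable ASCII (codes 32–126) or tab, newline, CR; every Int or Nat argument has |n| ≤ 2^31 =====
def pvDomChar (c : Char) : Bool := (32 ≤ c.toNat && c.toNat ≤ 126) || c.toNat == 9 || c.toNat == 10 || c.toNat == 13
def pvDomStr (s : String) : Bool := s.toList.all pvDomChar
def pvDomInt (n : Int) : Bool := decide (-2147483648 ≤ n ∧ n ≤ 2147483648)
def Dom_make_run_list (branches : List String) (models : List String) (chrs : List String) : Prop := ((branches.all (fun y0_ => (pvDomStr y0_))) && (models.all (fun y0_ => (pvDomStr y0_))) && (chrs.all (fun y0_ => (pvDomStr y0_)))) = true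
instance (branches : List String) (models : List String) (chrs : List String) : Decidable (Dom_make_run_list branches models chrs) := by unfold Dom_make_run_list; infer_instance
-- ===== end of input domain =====

-- B replaces A's triple loop with full-runs rescans by two dedup passes (valid pairs, unique chrs) and a scan-free cross-product expansion; return value proved equal.
-- ===== PORT A =====
def pvNoRuns : List (String × String) :=
  [("hg38", "rheMac8_noOWM"),
   ("hg38-rheMac8", "rheMac8_noOWM"),
   ("hg38-rheMac8", "hg38_noAPES"),
   ("rheMac8", "hg38_noAPES")]

def make_run_list (branches : List String) (models : List String) (chrs : List String) : List (List String) :=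
  branches.foldl (fun runs b =>
    models.foldl (fun runs m =>
      chrs.foldl (fun runs c =>
        if [b, m, c] ∉ runs ∧ (b, m) ∉ pvNoRuns then runs ++ [[b, m, c]] else runs)
        runs)
      runs)
    []

-- ===== PORT B =====
def make_run_list_alt (branches : List String) (models : List String) (chrs : List String) : List (List String) :=
  let pairs := branches.foldl (fun ps b =>
    models.foldl (fun ps m =>
      if (b, m) ∉ pvNoRuns ∧ (b, m) ∉ ps then ps ++ [(b, m)] else ps) ps) []
  let uniq_chrs := chrs.foldl (fun acc c => if c ∉ acc then acc ++ [c] else acc) []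
  pairs.foldl (fun runs p =>
    uniq_chrs.foldl (fun runs c => runs ++ [[p.1, p.2, c]]) runs) []

-- ===== PRECONDITION & SPEC =====
def Spec_make_run_list (branches : List String) (models : List String) (chrs : List String) (out : List (List String)) : Prop := out = make_run_list_alt branches models chrs
instance (branches : List String) (models : List String) (chrs : List String) (out : List (List String)) : Decidable (Spec_make_run_list branches models chrs out) := by unfold Spec_make_run_list; infer_instance

-- ===== CLAIM (what is proved, stated in full; the proofs are below) =====
def Claim_equal_make_run_list : Prop := ∀ (branches : List String) (models : List String) (chrs : List String), Dom_make_run_list branches models chrs → Spec_make_run_list branches models chrs (make_run_list branches models chrs)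

-- ===== LEMMAS AND PROOFS =====

/-- The cross-product expansion of a pair list with a chromosome list. -/
def pvExpand (ps : List (String × String)) (u : List String) : List (List String) :=
  ps.flatMap (fun p => u.map (fun c => [p.1, p.2, c]))

theorem pvExpand_nil (u : List String) : pvExpand [] u = [] := rfl

theorem pvExpand_append (ps : List (String × String)) (q : String × String) (u : List String) :
    pvExpand (ps ++ [q]) u = pvExpand ps u ++ u.map (fun c => [q.1, q.2, c]) := by
  simp [pvExpand]

theorem pvMem_expand (ps : List (String × String)) (u : List String) (x y z : String) :
    [x, y, z] ∈ pvExpand ps u ↔ (x, y) ∈ ps ∧ z ∈ u := by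
  simp only [pvExpand, List.mem_flatMap, List.mem_map]
  constructor
  · rintro ⟨p, hp, c, hc, h⟩
    simp only [List.cons.injEq, and_true] at h
    obtain ⟨h1, h2, h3⟩ := h
    subst h1 h2 h3
    exact ⟨hp, hc⟩
  · rintro ⟨hp, hz⟩
    exact ⟨(x, y), hp, z, hz, rfl⟩

/-- The dedup accumulator: anything in the accumulator or the remaining list is in the result. -/
theorem pvMem_dedup_foldl (cs : List String) :
    ∀ (acc : List String) (x : String), (x ∈ acc ∨ x ∈ cs) →
      x ∈ cs.foldl (fun acc c => if c ∉ acc then acc ++ [c] else acc) acc := by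
  induction cs with
  | nil =>
    intro acc x h
    rcases h with h | h
    · exact h
    · simp at h
  | cons c cs ih =>
    intro acc x h
    simp only [List.foldl_cons]
    apply ih
    by_cases hc : c ∈ acc
    · rw [if_neg (by simp [hc])]
      rcases h with h | h
      · exact Or.inl h
      · rcases List.mem_cons.mp h with h | h
        · exact Or.inl (h ▸ hc)
        · exact Or.inr h
    · rw [if_pos (by simp [hc])]
      rcases h with h | h
      · exact Or.inl (List.mem_append_left _ h)
      · rcases List.mem_cons.mp h with h | h
        · exact Or.inl (by simp [h])
        · exact Or.inr h

/-- A's inner chr loop does nothing when every combo is already present. -/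
theorem pvChrLoop_noop (b m : String) (cs : List String) (R : List (List String))
    (h : ∀ c ∈ cs, [b, m, c] ∈ R) :
    cs.foldl (fun runs c =>
        if [b, m, c] ∉ runs ∧ (b, m) ∉ pvNoRuns then runs ++ [[b, m, c]] else runs) R = R := by
  induction cs with
  | nil => rfl
  | cons c cs ih =>
    simp only [List.foldl_cons]
    rw [if_neg (by simp [h c (by simp)])]
    exact ih (fun c' hc' => h c' (by simp [hc']))

/-- A's inner chr loop, when the pair is fresh and allowed, appends the deduped chromosomes. -/
theorem pvChrLoop_fresh (b m : String) (hbm : (b, m) ∉ pvNoRuns) (cs : List String) :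
    ∀ (R : List (List String)) (S : List String), (∀ c, [b, m, c] ∉ R) →
      cs.foldl (fun runs c =>
          if [b, m, c] ∉ runs ∧ (b, m) ∉ pvNoRuns then runs ++ [[b, m, c]] else runs)
        (R ++ S.map (fun c => [b, m, c]))
      = R ++ (cs.foldl (fun acc c => if c ∉ acc then acc ++ [c] else acc) S).map
          (fun c => [b, m, c]) := by
  induction cs with
  | nil => intro R S hR; rfl
  | cons c cs ih =>
    intro R S hR
    simp only [List.foldl_cons]
    have hmem : [b, m, c] ∈ R ++ S.map (fun c => [b, m, c]) ↔ c ∈ S := by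
      simp only [List.mem_append, List.mem_map]
      constructor
      · rintro (h | ⟨c', hc', h⟩)
        · exact absurd h (hR c)
        · simp only [List.cons.injEq, and_true] at h
          exact h.2.2 ▸ hc'
      · intro h; exact Or.inr ⟨c, h, rfl⟩
    by_cases hc : c ∈ S
    · rw [if_neg (by simp [hmem.mpr hc]), if_neg (by simp [hc])]
      exact ih R S hR
    · rw [if_pos ⟨by simpa [hmem] using hc, hbm⟩, if_pos (by simpa using hc)]
      have : R ++ S.map (fun c => [b, m, c]) ++ [[b, m, c]]
          = R ++ (S ++ [c]).map (fun c => [b, m, c]) := by simp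
      rw [this]
      exact ih R (S ++ [c]) hR

/-- A's inner chr loop does nothing when the pair is blacklisted. -/
theorem pvChrLoop_blocked (b m : String) (hno : (b, m) ∈ pvNoRuns) (cs : List String)
    (R : List (List String)) :
    cs.foldl (fun runs c =>
        if [b, m, c] ∉ runs ∧ (b, m) ∉ pvNoRuns then runs ++ [[b, m, c]] else runs) R = R := by
  induction cs generalizing R with
  | nil => rfl
  | cons c cs ih => simp only [List.foldl_cons]; rw [if_neg (by simp [hno])]; exact ih R

/-- One (b,m) step: A's chr loop from an expanded state equals expanding the stepped pair list. -/
theorem pvPairStep (b m : String) (chrs : List String) (P : List (String × String))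
    (uniq : List String) (huniq : uniq = chrs.foldl (fun acc c => if c ∉ acc then acc ++ [c] else acc) []) :
    chrs.foldl (fun runs c =>
        if [b, m, c] ∉ runs ∧ (b, m) ∉ pvNoRuns then runs ++ [[b, m, c]] else runs)
      (pvExpand P uniq)
    = pvExpand (if (b, m) ∉ pvNoRuns ∧ (b, m) ∉ P then P ++ [(b, m)] else P) uniq := by
  by_cases hno : (b, m) ∈ pvNoRuns
  · rw [if_neg (by simp [hno])]
    exact pvChrLoop_blocked b m hno chrs _
  · by_cases hP : (b, m) ∈ P
    · rw [if_neg (by simp [hP])]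
      apply pvChrLoop_noop
      intro c hc
      exact (pvMem_expand P uniq b m c).mpr ⟨hP, huniq ▸ pvMem_dedup_foldl chrs [] c (Or.inr hc)⟩
    · rw [if_pos ⟨hno, hP⟩]
      have hfresh : ∀ c, [b, m, c] ∉ pvExpand P uniq := by
        intro c h
        exact hP ((pvMem_expand P uniq b m c).mp h).1
      have := pvChrLoop_fresh b m hno chrs (pvExpand P uniq) [] (by simpa using hfresh)
      simp only [List.map_nil, List.append_nil] at this
      rw [this, ← huniq, pvExpand_append]

/-- A's model loop tracks B's pair-building model loop through the expansion. -/
theorem pvModelLoop (b : String) (models chrs : List String) (uniq : List String)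
    (huniq : uniq = chrs.foldl (fun acc c => if c ∉ acc then acc ++ [c] else acc) []) :
    ∀ (P : List (String × String)),
      models.foldl (fun runs m =>
          chrs.foldl (fun runs c =>
            if [b, m, c] ∉ runs ∧ (b, m) ∉ pvNoRuns then runs ++ [[b, m, c]] else runs) runs)
        (pvExpand P uniq)
      = pvExpand (models.foldl (fun ps m =>
            if (b, m) ∉ pvNoRuns ∧ (b, m) ∉ ps then ps ++ [(b, m)] else ps) P) uniq := by
  induction models with
  | nil => intro P; rfl
  | cons m ms ih =>
    intro P
    simp only [List.foldl_cons]
    rw [pvPairStep b m chrs P uniq huniq]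
    exact ih _

/-- A's branch loop tracks B's pair-building branch loop through the expansion. -/
theorem pvBranchLoop (branches models chrs : List String) (uniq : List String)
    (huniq : uniq = chrs.foldl (fun acc c => if c ∉ acc then acc ++ [c] else acc) []) :
    ∀ (P : List (String × String)),
      branches.foldl (fun runs b =>
          models.foldl (fun runs m =>
            chrs.foldl (fun runs c =>
              if [b, m, c] ∉ runs ∧ (b, m) ∉ pvNoRuns then runs ++ [[b, m, c]] else runs) runs) runs)
        (pvExpand P uniq)
      = pvExpand (branches.foldl (fun ps b =>
            models.foldl (fun ps m =>
              if (b, m) ∉ pvNoRuns ∧ (b, m) ∉ ps then ps ++ [(b, m)] else ps) ps) P) uniq := by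
  induction branches with
  | nil => intro P; rfl
  | cons b bs ih =>
    intro P
    simp only [List.foldl_cons]
    rw [pvModelLoop b models chrs uniq huniq]
    exact ih _

/-- B's final expansion loop is the flatMap expansion. -/
theorem pvAltExpand (ps : List (String × String)) (uniq : List String) :
    ps.foldl (fun runs p => uniq.foldl (fun runs c => runs ++ [[p.1, p.2, c]]) runs) []
      = pvExpand ps uniq := by
  have inner : ∀ (p : String × String) (R : List (List String)),
      uniq.foldl (fun runs c => runs ++ [[p.1, p.2, c]]) R
        = R ++ uniq.map (fun c => [p.1, p.2, c]) := by
    intro p R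
    induction uniq generalizing R with
    | nil => simp
    | cons c cs ih => simp [ih]
  have outer : ∀ (ps : List (String × String)) (R : List (List String)),
      ps.foldl (fun runs p => uniq.foldl (fun runs c => runs ++ [[p.1, p.2, c]]) runs) R
        = R ++ pvExpand ps uniq := by
    intro ps
    induction ps with
    | nil => intro R; simp [pvExpand]
    | cons p ps ih =>
      intro R
      simp only [List.foldl_cons, inner p R, ih, pvExpand, List.flatMap_cons, List.append_assoc]
  simpa using outer ps []

-- ===== VERDICT (by name: the statement is the Claim_ definition above) =====
theorem make_run_list_spec : Claim_equal_make_run_list := by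
  intro branches models chrs _
  unfold Spec_make_run_list make_run_list make_run_list_alt
  rw [pvAltExpand]
  have h := pvBranchLoop branches models chrs _ rfl []
  rw [pvExpand_nil] at h
  exact h
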